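-- pv_equiv track=rewrite | github.com/Bdabet/clamp_picking_pipeline | scene_analysis/scene_analysis.py | middlemost_true_region
-- ===== SOURCE A (Python) =====
-- def middlemost_true_region(regions):
--
--     # Get the total number of regions
--     total_regions = len(regions)
--
--     # Find the middle index of the entire dictionary
--     middle_index = total_regions // 2
--
--     # Convert the keys to a list
--     region_keys = list(regions.keys())
--
--     # Find the indices of all True regions
--     true_indices = [i for i, key in enumerate(region_keys) if regions[key]]
--
--     if not true_indices:
--         return None  # Return None if no True regions exist
--
--     # Find the True region closest to the middle index
--     closest_index = min(true_indices, key=lambda x: abs(x - middle_index))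
--
--     return region_keys[closest_index], closest_index
-- ===== SOURCE B (Python) =====
-- def middlemost_true_region(regions):
--     # Outward scan from the middle index: first hit is the answer
--     # (smaller index tested first on ties, matching min's tie-break).
--     keys = list(regions.keys())
--     n = len(keys)
--     middle = n // 2
--     for dist in range(n + 1):
--         i = middle - dist
--         if 0 <= i < n and regions[keys[i]]:
--             return keys[i], i
--         j = middle + dist
--         if 0 < dist and j < n and regions[keys[j]]:
--             return keys[j], j
--     return None
-- ===== Notes on version B (the rewrite author's own statement) =====
-- stated objective: alternative
-- what changed: Instead of materialising the list of all True indices and taking min by distance to the middle, B scans outward from the middle index (testing middle-dist before middle+dist) and returns the first True region it meets.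
import Mathlib
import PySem

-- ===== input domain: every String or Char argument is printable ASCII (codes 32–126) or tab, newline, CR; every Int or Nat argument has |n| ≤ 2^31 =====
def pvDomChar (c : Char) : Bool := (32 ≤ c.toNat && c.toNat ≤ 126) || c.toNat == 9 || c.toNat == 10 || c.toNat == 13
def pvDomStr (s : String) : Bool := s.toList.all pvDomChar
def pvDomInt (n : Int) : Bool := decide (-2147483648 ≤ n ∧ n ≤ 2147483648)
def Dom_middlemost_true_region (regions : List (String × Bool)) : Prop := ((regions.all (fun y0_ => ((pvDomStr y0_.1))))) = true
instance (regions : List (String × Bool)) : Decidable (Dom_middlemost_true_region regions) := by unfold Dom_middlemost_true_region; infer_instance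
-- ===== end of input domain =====

-- B replaces "collect all True indices, then min by distance to the middle" by an
-- outward scan from the middle index that returns the first True region it meets
-- (objective: alternative decomposition, same worst-case cost).

-- ===== PORT A =====
-- the comprehension [i for i, key in enumerate(region_keys) if regions[key]]
-- (regions[key] never raises here: key is drawn from regions.keys())
def pvTrueIdx (d : PySem.Dict String Bool) (keys : List String) : List Int :=
  ((PySem.List.enumerate keys 0).filter (fun p => d.getD p.2 false)).map (fun p => p.1)

def middlemost_true_region (regions : List (String × Bool)) : Option (String × Int) :=
  let d := PySem.Dict.ofList regions
  let totalRegions : Int := (d.size : Int)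
  let middleIndex : Int := PySem.Int.floordiv totalRegions 2
  let regionKeys := d.keys
  let trueIndices := pvTrueIdx d regionKeys
  if trueIndices = [] then
    none
  else
    match PySem.List.min? trueIndices (fun x => |x - middleIndex|) with
    | none => none      -- unreachable: min? of a nonempty list
    | some closest =>
      match PySem.List.pyGet? regionKeys closest with
      | none => none    -- unreachable totality guard: closest is a valid index
      | some k => some (k, closest)

-- ===== PORT B =====
-- regions[keys[i]] of Source B (only evaluated when the guards put i in range)
def pvLook (d : PySem.Dict String Bool) (keys : List String) (i : Int) : Bool :=
  match PySem.List.pyGet? keys i with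
  | some k => d.getD k false
  | none => false

-- the 'for dist in range(n + 1)' loop of Source B, with its two early returns
def middlemostScan (d : PySem.Dict String Bool) (keys : List String) (n middle : Int) :
    List Int → Option (String × Int)
  | [] => none
  | dist :: rest =>
    if 0 ≤ middle - dist ∧ middle - dist < n ∧ pvLook d keys (middle - dist) = true then
      (PySem.List.pyGet? keys (middle - dist)).map (fun k => (k, middle - dist))
    else if 0 < dist ∧ middle + dist < n ∧ pvLook d keys (middle + dist) = true then
      (PySem.List.pyGet? keys (middle + dist)).map (fun k => (k, middle + dist))
    else middlemostScan d keys n middle rest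

def middlemost_true_region_alt (regions : List (String × Bool)) : Option (String × Int) :=
  let d := PySem.Dict.ofList regions
  let keys := d.keys
  let n : Int := (keys.length : Int)
  let middle : Int := PySem.Int.floordiv n 2
  middlemostScan d keys n middle (PySem.List.pyRange 0 (n + 1) 1)

-- ===== PRECONDITION & SPEC =====
def Spec_middlemost_true_region (regions : List (String × Bool)) (out : Option (String × Int)) : Prop := out = middlemost_true_region_alt regions
instance (regions : List (String × Bool)) (out : Option (String × Int)) : Decidable (Spec_middlemost_true_region regions out) := by unfold Spec_middlemost_true_region; infer_instance

-- ===== CLAIM (what is proved, stated in full; the proofs are below) =====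
def Claim_equal_middlemost_true_region : Prop := ∀ (regions : List (String × Bool)), Dom_middlemost_true_region regions → Spec_middlemost_true_region regions (middlemost_true_region regions)

-- ===== LEMMAS AND PROOFS =====

theorem pvFloordivTwo (n : Nat) : PySem.Int.floordiv (n : Int) 2 = ((n / 2 : Nat) : Int) := by
  rw [PySem.Int.floordiv, Int.fdiv_eq_ediv, if_pos (Or.inl (by norm_num))]
  omega

-- pvFoldl_keep/find/min are stated for any step function f that behaves like
-- the foldl step inside PySem.List.min? (its match equations, hfs/hfn below)
theorem pvFoldl_keep (key : Int → Int) (f : Option Int → Int → Option Int)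
    (hfs : ∀ (b x : Int), f (some b) x = if key x < key b then some x else some b) :
    ∀ (t : List Int) (b : Int), (∀ j ∈ t, ¬ (key j < key b)) →
      t.foldl f (some b) = some b
  | [], _, _ => rfl
  | a :: t, b, h => by
    have hstep : f (some b) a = some b := by
      rw [hfs]
      rw [if_neg (h a List.mem_cons_self)]
    rw [List.foldl_cons, hstep]
    exact pvFoldl_keep key f hfs t b (fun j hj => h j (List.mem_cons_of_mem _ hj))

theorem pvFoldl_find (key : Int → Int) (f : Option Int → Int → Option Int)
    (hfs : ∀ (b x : Int), f (some b) x = if key x < key b then some x else some b) :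
    ∀ (t : List Int) (b c : Int), c ∈ t → key c < key b → t.Pairwise (· < ·) →
      (∀ j ∈ t, key c < key j ∨ (key c = key j ∧ c ≤ j)) →
      t.foldl f (some b) = some c
  | [], _, _, hc, _, _, _ => absurd hc (List.not_mem_nil)
  | a :: t, b, c, hc, hb, hp, hmin => by
    rw [List.foldl_cons]
    by_cases hac : a = c
    · subst hac
      have hstep : f (some b) a = some a := by
        rw [hfs]
        rw [if_pos hb]
      rw [hstep]
      refine pvFoldl_keep key f hfs t a (fun j hj h => ?_)
      rcases hmin j (List.mem_cons_of_mem _ hj) with h' | ⟨h', _⟩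
      · omega
      · omega
    · have hct : c ∈ t := by
        rcases List.mem_cons.mp hc with h | h
        · exact absurd h.symm hac
        · exact h
      have hlt : a < c := (List.pairwise_cons.mp hp).1 c hct
      have hka : key c < key a := by
        rcases hmin a List.mem_cons_self with h | ⟨_, h⟩
        · exact h
        · omega
      have hp' := (List.pairwise_cons.mp hp).2
      have hmin' : ∀ j ∈ t, key c < key j ∨ (key c = key j ∧ c ≤ j) :=
        fun j hj => hmin j (List.mem_cons_of_mem _ hj)
      by_cases hab : key a < key b
      · have hstep : f (some b) a = some a := by
          rw [hfs]; rw [if_pos hab]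
        rw [hstep]
        exact pvFoldl_find key f hfs t a c hct hka hp' hmin'
      · have hstep : f (some b) a = some b := by
          rw [hfs]; rw [if_neg hab]
        rw [hstep]
        exact pvFoldl_find key f hfs t b c hct hb hp' hmin'

theorem pvFoldlMin_eq (key : Int → Int) (f : Option Int → Int → Option Int)
    (hfn : ∀ (x : Int), f none x = some x)
    (hfs : ∀ (b x : Int), f (some b) x = if key x < key b then some x else some b)
    (xs : List Int) (c : Int)
    (hp : xs.Pairwise (· < ·)) (hc : c ∈ xs)
    (hmin : ∀ j ∈ xs, key c < key j ∨ (key c = key j ∧ c ≤ j)) :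
    xs.foldl f none = some c := by
  cases xs with
  | nil => exact absurd hc (List.not_mem_nil)
  | cons a t =>
    rw [List.foldl_cons, hfn]
    by_cases hac : a = c
    · subst hac
      refine pvFoldl_keep key f hfs t a (fun j hj h => ?_)
      rcases hmin j (List.mem_cons_of_mem _ hj) with h' | ⟨h', _⟩ <;> omega
    · have hct : c ∈ t := by
        rcases List.mem_cons.mp hc with h | h
        · exact absurd h.symm hac
        · exact h
      have hka : key c < key a := by
        rcases hmin a List.mem_cons_self with h | ⟨_, h⟩
        · exact h
        · have hlt : a < c := (List.pairwise_cons.mp hp).1 c hct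
          omega
      exact pvFoldl_find key f hfs t a c hct hka (List.pairwise_cons.mp hp).2
        (fun j hj => hmin j (List.mem_cons_of_mem _ hj))

theorem pvMin?_eq (xs : List Int) (key : Int → Int) (c : Int)
    (hp : xs.Pairwise (· < ·)) (hc : c ∈ xs)
    (hmin : ∀ j ∈ xs, key c < key j ∨ (key c = key j ∧ c ≤ j)) :
    PySem.List.min? xs key = some c := by
  unfold PySem.List.min?
  exact pvFoldlMin_eq key _ (fun x => rfl) (fun b x => rfl) xs c hp hc hmin

theorem mem_pvTrueIdx (d : PySem.Dict String Bool) (keys : List String) (x : Int) :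
    x ∈ pvTrueIdx d keys ↔
      ∃ (k : Nat) (hk : k < keys.length), x = (k : Int) ∧ d.getD keys[k] false = true := by
  unfold pvTrueIdx
  rw [List.mem_map]
  constructor
  · rintro ⟨p, hp, rfl⟩
    rw [List.mem_filter] at hp
    obtain ⟨hpe, hpt⟩ := hp
    rw [PySem.List.mem_enumerate_iff] at hpe
    obtain ⟨k, hk, rfl⟩ := hpe
    exact ⟨k, hk, by simp, by simpa using hpt⟩
  · rintro ⟨k, hk, rfl, ht⟩
    refine ⟨((0 : Int) + k, keys[k]), List.mem_filter.mpr ⟨?_, by simpa using ht⟩, by simp⟩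
    rw [PySem.List.mem_enumerate_iff]
    exact ⟨k, hk, rfl⟩

theorem pairwise_pvTrueIdx (d : PySem.Dict String Bool) (keys : List String) :
    (pvTrueIdx d keys).Pairwise (· < ·) := by
  unfold pvTrueIdx
  rw [List.pairwise_map]
  exact (PySem.List.pairwise_lt_enumerate keys 0).filter _

theorem pvLook_nat (d : PySem.Dict String Bool) (keys : List String) (k : Nat)
    (hk : k < keys.length) : pvLook d keys (k : Int) = d.getD keys[k] false := by
  simp [pvLook, PySem.List.pyGet?_natCast, List.getElem?_eq_getElem hk]

theorem pvScan_none (d : PySem.Dict String Bool) (keys : List String) (N M : Int)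
    (hN : N = (keys.length : Int)) (hM : M = ((keys.length / 2 : Nat) : Int))
    (hno : ∀ (k : Nat) (hk : k < keys.length), d.getD keys[k] false = false) :
    ∀ L, middlemostScan d keys N M L = none := by
  intro L
  induction L with
  | nil => rfl
  | cons dist rest ih =>
    have hlk : ∀ i : Int, 0 ≤ i → i < N → pvLook d keys i = false := by
      intro i h0 h1
      have hkn : i.toNat < keys.length := by omega
      have : i = ((i.toNat : Nat) : Int) := by omega
      rw [this, pvLook_nat d keys i.toNat hkn]
      exact hno i.toNat hkn
    show middlemostScan d keys N M (dist :: rest) = none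
    rw [middlemostScan]
    rw [if_neg (by rintro ⟨h0, h1, h2⟩; rw [hlk _ h0 h1] at h2; exact Bool.false_ne_true h2)]
    rw [if_neg (by rintro ⟨h0, h1, h2⟩; rw [hlk _ (by omega) h1] at h2; exact Bool.false_ne_true h2)]
    exact ih

theorem pvScan_found (d : PySem.Dict String Bool) (keys : List String) (N M : Int)
    (hN : N = (keys.length : Int)) (hM : M = ((keys.length / 2 : Nat) : Int)) :
    ∀ (L : List Int) (d0 : Int), L = PySem.List.pyRange d0 (N + 1) 1 → 0 ≤ d0 →
      (∀ (k : Nat) (hk : k < keys.length), d.getD keys[k] false = true → d0 ≤ |(k : Int) - M|) →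
      (∃ (k : Nat) (hk : k < keys.length), d.getD keys[k] false = true) →
      ∃ (i : Nat) (hi : i < keys.length), d.getD keys[i] false = true ∧
        (∀ (j : Nat) (hj : j < keys.length), d.getD keys[j] false = true →
          (|(i : Int) - M| < |(j : Int) - M| ∨ (|(i : Int) - M| = |(j : Int) - M| ∧ i ≤ j))) ∧
        middlemostScan d keys N M L = some (keys[i], (i : Int)) := by
  intro L
  induction L with
  | nil =>
    intro d0 hL h0 hinv hex
    exfalso
    obtain ⟨k, hk, ht⟩ := hex
    -- any True index is at distance ≤ N from the middle, so the range cannot be exhausted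
    have hb := hinv k hk ht
    have hMb : 0 ≤ M ∧ M ≤ N := by constructor <;> omega
    have habs : |(k : Int) - M| ≤ N := by
      rcases abs_cases ((k : Int) - M) with ⟨he, _⟩ | ⟨he, _⟩ <;> omega
    have hd0 : d0 ≤ N := by omega
    have : d0 < N + 1 := by omega
    rw [PySem.List.pyRange_one_cons this] at hL
    exact List.cons_ne_nil _ _ hL.symm
  | cons dist rest ih =>
    intro d0 hL h0 hinv hex
    obtain ⟨k0, hk0, ht0⟩ := hex
    have hb := hinv k0 hk0 ht0
    have habs : |(k0 : Int) - M| ≤ N := by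
      rcases abs_cases ((k0 : Int) - M) with ⟨he, _⟩ | ⟨he, _⟩ <;> omega
    have hdN : d0 < N + 1 := by omega
    rw [PySem.List.pyRange_one_cons hdN] at hL
    obtain ⟨hd, hrest⟩ := List.cons.injEq .. ▸ hL
    subst hd
    by_cases hc1 : 0 ≤ M - dist ∧ M - dist < N ∧ pvLook d keys (M - dist) = true
    · obtain ⟨hc0, hcN, hct⟩ := hc1
      set i : Nat := (M - dist).toNat with hidef
      have hicast : ((i : Nat) : Int) = M - dist := by omega
      have hiN : i < keys.length := by omega
      have hti : d.getD keys[i] false = true := by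
        rw [← pvLook_nat d keys i hiN, hicast]; exact hct
      refine ⟨i, hiN, hti, ?_, ?_⟩
      · intro j hj htj
        have hbj := hinv j hj htj
        have hkeyi : |(i : Int) - M| = dist := by
          rw [hicast]
          rcases abs_cases (M - dist - M) with ⟨he, _⟩ | ⟨he, _⟩ <;> omega
        by_cases heq : |(j : Int) - M| = dist
        · right
          refine ⟨by omega, ?_⟩
          rcases abs_cases ((j : Int) - M) with ⟨he, _⟩ | ⟨he, _⟩ <;> omega
        · left; omega
      · rw [middlemostScan, if_pos ⟨hc0, hcN, hct⟩]
        have : PySem.List.pyGet? keys (M - dist) = some keys[i] := by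
          rw [← hicast, PySem.List.pyGet?_natCast, List.getElem?_eq_getElem hiN]
        rw [this, Option.map_some]
        rw [hicast]
    · by_cases hc2 : 0 < dist ∧ M + dist < N ∧ pvLook d keys (M + dist) = true
      · obtain ⟨hcd, hcN, hct⟩ := hc2
        have hM0 : 0 ≤ M := by omega
        set i : Nat := (M + dist).toNat with hidef
        have hicast : ((i : Nat) : Int) = M + dist := by omega
        have hiN : i < keys.length := by omega
        have hti : d.getD keys[i] false = true := by
          rw [← pvLook_nat d keys i hiN, hicast]; exact hct
        refine ⟨i, hiN, hti, ?_, ?_⟩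
        · intro j hj htj
          have hbj := hinv j hj htj
          have hkeyi : |(i : Int) - M| = dist := by
            rw [hicast]
            rcases abs_cases (M + dist - M) with ⟨he, _⟩ | ⟨he, _⟩ <;> omega
          by_cases heq : |(j : Int) - M| = dist
          · -- j is at the same distance; j = M - dist is impossible (hc1 would fire)
            have hj2 : (j : Int) = M - dist ∨ (j : Int) = M + dist := by
              rcases abs_cases ((j : Int) - M) with ⟨he, _⟩ | ⟨he, _⟩ <;> omega
            rcases hj2 with hje | hje
            · exfalso
              apply hc1
              refine ⟨by omega, by omega, ?_⟩
              have : M - dist = ((j : Nat) : Int) := by omega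
              rw [this, pvLook_nat d keys j hj]
              exact htj
            · right; constructor
              · omega
              · omega
          · left; omega
        · rw [middlemostScan, if_neg hc1, if_pos ⟨hcd, hcN, hct⟩]
          have : PySem.List.pyGet? keys (M + dist) = some keys[i] := by
            rw [← hicast, PySem.List.pyGet?_natCast, List.getElem?_eq_getElem hiN]
          rw [this, Option.map_some]
          rw [hicast]
      · -- neither side fires at this distance: no True index at distance dist
        have hinv' : ∀ (k : Nat) (hk : k < keys.length), d.getD keys[k] false = true →
            dist + 1 ≤ |(k : Int) - M| := by
          intro k hk ht
          have hbk := hinv k hk ht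
          by_contra hcon
          have heq : |(k : Int) - M| = dist := by omega
          have hk2 : (k : Int) = M - dist ∨ (k : Int) = M + dist := by
            rcases abs_cases ((k : Int) - M) with ⟨he, _⟩ | ⟨he, _⟩ <;> omega
          have hlkk : pvLook d keys ((k : Nat) : Int) = true := by
            rw [pvLook_nat d keys k hk]; exact ht
          rcases hk2 with hke | hke
          · exact hc1 ⟨by omega, by omega, by rw [show M - dist = ((k : Nat) : Int) by omega]; exact hlkk⟩
          · by_cases hd0 : dist = 0
            · exact hc1 ⟨by omega, by omega, by rw [show M - dist = ((k : Nat) : Int) by omega]; exact hlkk⟩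
            · exact hc2 ⟨by omega, by omega, by rw [show M + dist = ((k : Nat) : Int) by omega]; exact hlkk⟩
        obtain ⟨i, hi, hti, hmin, hscan⟩ :=
          ih (dist + 1) hrest (by omega) hinv' ⟨k0, hk0, ht0⟩
        refine ⟨i, hi, hti, hmin, ?_⟩
        rw [middlemostScan, if_neg hc1, if_neg hc2]
        exact hscan

-- ===== VERDICT (by name: the statement is the Claim_ definition above) =====
theorem middlemost_true_region_spec : Claim_equal_middlemost_true_region := by
  intro regions _
  unfold Spec_middlemost_true_region
  have hsz : PySem.Dict.size (PySem.Dict.ofList regions) =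
      (PySem.Dict.ofList regions).keys.length := by
    simp [PySem.Dict.size, PySem.Dict.keys]
  simp only [middlemost_true_region, middlemost_true_region_alt, hsz, pvFloordivTwo]
  generalize PySem.Dict.ofList regions = d
  generalize d.keys = keys
  by_cases hex : ∃ (k : Nat) (hk : k < keys.length), d.getD keys[k] false = true
  · obtain ⟨i, hi, hti, hmin, hscan⟩ :=
      pvScan_found d keys ((keys.length : Nat) : Int) ((keys.length / 2 : Nat) : Int) rfl rfl
        (PySem.List.pyRange 0 (((keys.length : Nat) : Int) + 1) 1) 0 rfl (le_refl 0)
        (fun k hk _ => abs_nonneg _) hex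
    rw [hscan]
    have hne : pvTrueIdx d keys ≠ [] := by
      intro hnil
      obtain ⟨k, hk, ht⟩ := hex
      have hm : (k : Int) ∈ pvTrueIdx d keys :=
        (mem_pvTrueIdx d keys (k : Int)).mpr ⟨k, hk, rfl, ht⟩
      rw [hnil] at hm
      exact List.not_mem_nil hm
    rw [if_neg hne]
    have hminq : PySem.List.min? (pvTrueIdx d keys)
        (fun x => |x - ((keys.length / 2 : Nat) : Int)|) = some (i : Int) := by
      apply pvMin?_eq
      · exact pairwise_pvTrueIdx d keys
      · exact (mem_pvTrueIdx d keys (i : Int)).mpr ⟨i, hi, rfl, hti⟩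
      · intro j hj
        obtain ⟨k, hk, rfl, htk⟩ := (mem_pvTrueIdx d keys j).mp hj
        rcases hmin k hk htk with h | ⟨h1, h2⟩
        · left; exact h
        · right; exact ⟨h1, by omega⟩
    have hget : PySem.List.pyGet? keys ((i : Nat) : Int) = some keys[i] := by
      rw [PySem.List.pyGet?_natCast, List.getElem?_eq_getElem hi]
    simp only [hminq, hget]
  · push Not at hex
    have hno : ∀ (k : Nat) (hk : k < keys.length), d.getD keys[k] false = false := by
      intro k hk
      exact Bool.eq_false_iff.mpr (hex k hk)
    rw [pvScan_none d keys ((keys.length : Nat) : Int) ((keys.length / 2 : Nat) : Int)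
      rfl rfl hno _]
    have hnil : pvTrueIdx d keys = [] := by
      rw [List.eq_nil_iff_forall_not_mem]
      intro x hx
      obtain ⟨k, hk, _, htk⟩ := (mem_pvTrueIdx d keys x).mp hx
      rw [hno k hk] at htk
      exact Bool.false_ne_true htk
    rw [if_pos hnil]
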